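-- pv_equiv track=rewrite | github.com/pgergov/Programming101-v3 | Last-edition-tasks/1-Python-simple-problems/sevens_in_a_row.py | sevens_in_a_row
-- ===== SOURCE A (Python) =====
-- def sevens_in_a_row(arr, n):
--     counter = 0
--     for numb in arr:
--         if numb == 7:
--             counter += 1
--         else:
--             if counter == n:
--                 return True
--             counter = 0
--     if counter == n:
--         return True
--     else:
--         return False
-- ===== SOURCE B (Python) =====
-- def sevens_in_a_row(arr, n):
--     s = ''.join('7' if e == 7 else ' ' for e in arr)
--     return n in [len(seg) for seg in s.split(' ')]
-- ===== Notes on version B (the rewrite author's own statement) =====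
-- stated objective: simpler
-- what changed: Replaces A's early-exit counter scan with a build-then-test decomposition: map each element to '7' or ' ', split the string on ' ' to get every (possibly empty) run of sevens, and test n against the list of run lengths.
import Mathlib
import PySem

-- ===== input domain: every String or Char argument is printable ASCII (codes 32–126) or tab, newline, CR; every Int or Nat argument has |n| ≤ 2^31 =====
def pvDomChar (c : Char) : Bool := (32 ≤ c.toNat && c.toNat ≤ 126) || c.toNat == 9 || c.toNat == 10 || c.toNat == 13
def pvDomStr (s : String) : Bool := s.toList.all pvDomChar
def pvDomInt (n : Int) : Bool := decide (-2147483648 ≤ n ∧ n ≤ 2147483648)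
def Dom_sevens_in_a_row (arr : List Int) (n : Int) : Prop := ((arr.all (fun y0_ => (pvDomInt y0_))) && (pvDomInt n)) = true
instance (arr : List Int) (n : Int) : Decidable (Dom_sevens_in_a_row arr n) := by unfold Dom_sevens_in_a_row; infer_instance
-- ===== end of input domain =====

-- B replaces A's early-exit counter scan by a simpler build-then-test decomposition:
-- map elements to '7'/' ', split on ' ' into every (possibly empty) run of sevens, and
-- test n for membership in the list of run lengths.


-- ===== PORT A =====
-- A's for-loop with early 'return True': structural recursion over arr carrying the counter.
def sevensLoop : List Int → Int → Int → Bool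
  | [], counter, n => counter == n
  | numb :: rest, counter, n =>
    if numb == 7 then sevensLoop rest (counter + 1) n
    else if counter == n then true
    else sevensLoop rest 0 n

def sevens_in_a_row (arr : List Int) (n : Int) : Bool := sevensLoop arr 0 n

-- ===== PORT B =====
-- strings are ported as List Char (PySem.Chars is the definitional layer of PySem.Str)
def sevens_in_a_row_alt (arr : List Int) (n : Int) : Bool :=
  -- s = ''.join('7' if e == 7 else ' ' for e in arr)
  let s : List Char := PySem.Chars.join [] (arr.map (fun e => if e == 7 then ['7'] else [' ']))
  -- n in [len(seg) for seg in s.split(' ')]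
  ((PySem.Chars.splitOn s [' ']).map (fun seg => PySem.Chars.len seg)).contains n

-- ===== PRECONDITION & SPEC =====
def Spec_sevens_in_a_row (arr : List Int) (n : Int) (out : Bool) : Prop := out = sevens_in_a_row_alt arr n
instance (arr : List Int) (n : Int) (out : Bool) : Decidable (Spec_sevens_in_a_row arr n out) := by unfold Spec_sevens_in_a_row; infer_instance

-- ===== CLAIM (what is proved, stated in full; the proofs are below) =====
def Claim_equal_sevens_in_a_row : Prop := ∀ (arr : List Int) (n : Int), Dom_sevens_in_a_row arr n → Spec_sevens_in_a_row arr n (sevens_in_a_row arr n)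

-- ===== LEMMAS AND PROOFS =====

-- run lengths of the maximal (possibly empty) segments of 7s, as Nats
def addHeadN (k : Nat) : List Nat → List Nat
  | [] => [k]
  | h :: t => (k + h) :: t

def segsN : List Int → List Nat
  | [] => [0]
  | x :: xs => if x = 7 then addHeadN 1 (segsN xs) else 0 :: segsN xs

lemma int_beq_swap (a b : Int) : (a == b) = decide (b = a) := by
  by_cases h : a = b
  · subst h; simp
  · simp [h, Ne.symm h]

lemma segsN_ne_nil (xs : List Int) : segsN xs ≠ [] := by
  cases xs with
  | nil => simp [segsN]
  | cons x xs =>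
    simp only [segsN]
    split
    · cases h : segsN xs <;> simp [addHeadN]
    · simp

lemma addHeadN_addHeadN (k j : Nat) (s : List Nat) :
    addHeadN k (addHeadN j s) = addHeadN (k + j) s := by
  cases s <;> simp [addHeadN] <;> omega

lemma addHeadN_zero (s : List Nat) (h : s ≠ []) : addHeadN 0 s = s := by
  cases s with
  | nil => exact absurd rfl h
  | cons a t => simp [addHeadN]

-- the character each element is mapped to
def charOf (e : Int) : Char := if e == 7 then '7' else ' '

lemma join_map_eq (arr : List Int) :
    PySem.Chars.join [] (arr.map (fun e => if e == 7 then ['7'] else [' ']))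
      = arr.map charOf := by
  have h : (arr.map (fun e => if e == 7 then ['7'] else [' ']))
      = (arr.map charOf).map (fun c => [c]) := by
    simp only [List.map_map]
    apply List.map_congr_left
    intro e _
    by_cases h : e = 7 <;> simp [charOf, h]
  rw [h, PySem.Chars.join_nil_singletons]

-- lengths produced by splitOn's fuel loop on a mapped list = segsN, with accumulators
lemma go_lengths (xs : List Int) : ∀ (fuel : Nat) (cur : List Char) (acc : List (List Char)),
    xs.length ≤ fuel →
    (PySem.Chars.splitOn.go [' '] fuel (xs.map charOf) cur acc).map List.length
      = acc.reverse.map List.length ++ addHeadN cur.length (segsN xs) := by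
  induction xs with
  | nil =>
    intro fuel cur acc _
    cases fuel <;> simp [PySem.Chars.splitOn.go, segsN, addHeadN]
  | cons x xs ih =>
    intro fuel cur acc hf
    cases fuel with
    | zero => simp at hf
    | succ f =>
      have hf' : xs.length ≤ f := by simpa using hf
      by_cases hx : x = 7
      · have hc : charOf x = '7' := by simp [charOf, hx]
        rw [List.map_cons, hc]
        have hstep : PySem.Chars.splitOn.go [' '] (f + 1) ('7' :: xs.map charOf) cur acc
            = PySem.Chars.splitOn.go [' '] f (xs.map charOf) ('7' :: cur) acc := by
          simp [PySem.Chars.splitOn.go, List.isPrefixOf]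
        rw [hstep, ih f ('7' :: cur) acc hf']
        simp [segsN, hx, addHeadN_addHeadN]
      · have hc : charOf x = ' ' := by simp [charOf, hx]
        rw [List.map_cons, hc]
        have hstep : PySem.Chars.splitOn.go [' '] (f + 1) (' ' :: xs.map charOf) cur acc
            = PySem.Chars.splitOn.go [' '] f (xs.map charOf) [] (cur.reverse :: acc) := by
          simp [PySem.Chars.splitOn.go, List.isPrefixOf]
        rw [hstep, ih f [] (cur.reverse :: acc) hf']
        cases hxs : segsN xs with
        | nil => exact absurd hxs (segsN_ne_nil xs)
        | cons a b => simp [segsN, hx, hxs, addHeadN]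

lemma splitOn_lengths (arr : List Int) :
    (PySem.Chars.splitOn (arr.map charOf) [' ']).map List.length = segsN arr := by
  unfold PySem.Chars.splitOn
  rw [go_lengths arr _ [] [] (by simp)]
  simp [addHeadN_zero _ (segsN_ne_nil arr)]

lemma sevensLoop_eq (xs : List Int) : ∀ (c n : Int) (h : Nat) (t : List Nat),
    segsN xs = h :: t →
    sevensLoop xs c n = ((c + (h : Int)) == n || (t.map (fun k => (k : Int))).contains n) := by
  induction xs with
  | nil =>
    intro c n h t hseg
    simp [segsN] at hseg
    obtain ⟨rfl, rfl⟩ := hseg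
    simp [sevensLoop]
  | cons x xs ih =>
    intro c n h t hseg
    obtain ⟨h', t', hseg'⟩ : ∃ h' t', segsN xs = h' :: t' := by
      cases hxs : segsN xs with
      | nil => exact absurd hxs (segsN_ne_nil xs)
      | cons a b => exact ⟨a, b, rfl⟩
    by_cases hx : x = 7
    · simp only [segsN, hx, if_true, hseg', addHeadN] at hseg
      injection hseg with h1 h2
      subst h1; subst h2
      have : sevensLoop (x :: xs) c n = sevensLoop xs (c + 1) n := by
        simp [sevensLoop, hx]
      rw [this, ih (c + 1) n h' t' hseg']
      have harith : c + 1 + (h' : Int) = c + ((1 + h' : Nat) : Int) := by push_cast; ring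
      rw [harith]
    · simp only [segsN, hx, if_false] at hseg
      injection hseg with h1 h2
      subst h1; subst h2
      have : sevensLoop (x :: xs) c n = ((c == n) || sevensLoop xs 0 n) := by
        simp only [sevensLoop]
        split
        · rename_i h7; exact absurd (by simpa using h7) hx
        · by_cases hc : c = n <;> simp [hc]
      rw [this, ih 0 n h' t' hseg', hseg']
      simp [int_beq_swap]

lemma alt_eq (arr : List Int) (n : Int) :
    sevens_in_a_row_alt arr n = ((segsN arr).map (fun k : Nat => (k : Int))).contains n := by
  unfold sevens_in_a_row_alt
  rw [join_map_eq, ← splitOn_lengths arr, List.map_map]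
  rfl

-- ===== VERDICT (by name: the statement is the Claim_ definition above) =====
theorem sevens_in_a_row_spec : Claim_equal_sevens_in_a_row := by
  intro arr n _
  unfold Spec_sevens_in_a_row sevens_in_a_row
  obtain ⟨h, t, hseg⟩ : ∃ h t, segsN arr = h :: t := by
    cases hxs : segsN arr with
    | nil => exact absurd hxs (segsN_ne_nil arr)
    | cons a b => exact ⟨a, b, rfl⟩
  rw [alt_eq, hseg, sevensLoop_eq arr 0 n h t hseg]
  simp [int_beq_swap, eq_comm]
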